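-- pv_equiv track=rewrite | github.com/zofialuther/CS8395-08-Paper1-updated | data/translated-code/pseudo-to-python/java/Comma-quibbling.py | quibble
-- ===== SOURCE A (Python) =====
-- def quibble(words):
--     qText = "{"
--     for wIndex in range(len(words)):
--         qText += words[wIndex]
--         if wIndex == len(words) - 1:
--             qText += ""
--         elif wIndex == len(words) - 2:
--             qText += " and "
--         else:
--             qText += ", "
--     qText += "}"
--     return qText
-- ===== SOURCE B (Python) =====
-- def quibble(words):
--     if not words:
--         return "{}"
--     if len(words) == 1:
--         return "{" + words[0] + "}"
--     return "{" + ", ".join(words[:-1]) + " and " + words[-1] + "}"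
-- ===== Notes on version B (the rewrite author's own statement) =====
-- stated objective: simpler
-- what changed: Replaced the index loop with its three-way position test per element by two early returns plus a head/tail decomposition: one ', '.join over words[:-1] and a single ' and ' before words[-1].
import Mathlib
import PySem

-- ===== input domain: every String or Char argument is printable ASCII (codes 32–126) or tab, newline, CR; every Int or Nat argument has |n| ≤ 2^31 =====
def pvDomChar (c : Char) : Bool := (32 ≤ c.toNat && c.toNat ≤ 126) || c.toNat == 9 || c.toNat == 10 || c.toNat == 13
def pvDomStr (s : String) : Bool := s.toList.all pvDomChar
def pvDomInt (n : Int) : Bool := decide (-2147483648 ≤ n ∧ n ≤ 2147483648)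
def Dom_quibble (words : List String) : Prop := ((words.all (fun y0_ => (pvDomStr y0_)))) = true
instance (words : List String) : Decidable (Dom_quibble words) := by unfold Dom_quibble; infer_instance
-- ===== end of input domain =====

-- B replaces A's index loop with its per-element three-way separator test by two early
-- returns plus a single ", ".join over words[:-1] and one " and " before words[-1] (simpler).

-- ===== PORT A =====
def quibble (words : List String) : String :=
  (PySem.List.pyRange 0 (words.length : Int) 1).foldl
    (fun qText wIndex =>
      let q1 := qText ++ PySem.List.pyGetD words wIndex ""
      if wIndex = (words.length : Int) - 1 then q1 ++ ""
      else if wIndex = (words.length : Int) - 2 then q1 ++ " and "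
      else q1 ++ ", ")
    "{" ++ "}"

-- ===== PORT B =====
def quibble_alt (words : List String) : String :=
  match words with
  | [] => "{}"
  | [w] => "{" ++ w ++ "}"
  | w :: rest =>
    "{" ++ PySem.Str.join ", " (PySem.List.slice (w :: rest) none (some (-1)))
        ++ " and " ++ PySem.List.pyGetD (w :: rest) (-1) "" ++ "}"

-- ===== PRECONDITION & SPEC =====
def Spec_quibble (words : List String) (out : String) : Prop := out = quibble_alt words
instance (words : List String) (out : String) : Decidable (Spec_quibble words out) := by unfold Spec_quibble; infer_instance

-- ===== CLAIM (what is proved, stated in full; the proofs are below) =====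
def Claim_equal_quibble : Prop := ∀ (words : List String), Dom_quibble words → Spec_quibble words (quibble words)

-- ===== LEMMAS AND PROOFS =====

-- recursive characterisation of A's loop: separator chosen by the remaining suffix
def goA (acc : String) : List String → String
  | [] => acc
  | [w] => acc ++ w
  | [w, v] => acc ++ w ++ " and " ++ v
  | w :: v :: u :: t => goA (acc ++ w ++ ", ") (v :: u :: t)

lemma quibble_loop (ws : List String) : ∀ (pre : List String) (acc : String),
    (PySem.List.pyRange (pre.length : Int) (((pre ++ ws).length : Int)) 1).foldl
      (fun qText wIndex =>
        let q1 := qText ++ PySem.List.pyGetD (pre ++ ws) wIndex ""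
        if wIndex = ((pre ++ ws).length : Int) - 1 then q1 ++ ""
        else if wIndex = ((pre ++ ws).length : Int) - 2 then q1 ++ " and "
        else q1 ++ ", ") acc
    = goA acc ws := by
  induction ws with
  | nil =>
    intro pre acc
    rw [PySem.List.pyRange_one_eq_nil (by simp)]
    simp [goA]
  | cons w ws ih =>
    intro pre acc
    have hlt : (pre.length : Int) < ((pre ++ w :: ws).length : Int) := by simp
    have hget : PySem.List.pyGetD (pre ++ w :: ws) (pre.length : Int) "" = w := by
      rw [PySem.List.pyGetD_natCast]
      simp
    have hstep : ∀ (acc' : String),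
        (PySem.List.pyRange ((pre.length : Int) + 1) (((pre ++ w :: ws).length : Int)) 1).foldl
          (fun qText wIndex =>
            let q1 := qText ++ PySem.List.pyGetD (pre ++ w :: ws) wIndex ""
            if wIndex = ((pre ++ w :: ws).length : Int) - 1 then q1 ++ ""
            else if wIndex = ((pre ++ w :: ws).length : Int) - 2 then q1 ++ " and "
            else q1 ++ ", ") acc' = goA acc' ws := by
      intro acc'
      have h := ih (pre ++ [w]) acc'
      rw [show (pre ++ [w]) ++ ws = pre ++ w :: ws from by simp] at h
      rw [show (((pre ++ [w]).length : Nat) : Int) = (pre.length : Int) + 1 from by simp] at h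
      exact h
    rw [PySem.List.pyRange_one_cons hlt, List.foldl_cons, hstep]
    simp only [hget]
    cases ws with
    | nil =>
      rw [if_pos (by simp)]
      simp [goA]
    | cons v vs =>
      cases vs with
      | nil =>
        rw [if_neg (by simp; try omega), if_pos (by simp; try omega)]
        simp [goA]
      | cons u us =>
        rw [if_neg (by simp; omega), if_neg (by simp; omega)]
        simp [goA]

lemma sjoin_singleton (sep w : String) : PySem.Str.join sep [w] = w := by
  apply String.toList_inj.mp
  simp [PySem.Str.toList_join, PySem.Chars.join_singleton]

lemma sjoin_cons_cons (sep p q : String) (rest : List String) :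
    PySem.Str.join sep (p :: q :: rest) = p ++ sep ++ PySem.Str.join sep (q :: rest) := by
  apply String.toList_inj.mp
  simp [PySem.Str.toList_join, PySem.Chars.join_cons_cons]

lemma pyGetD_neg_one (w : String) (ws : List String) :
    PySem.List.pyGetD (w :: ws) (-1 : Int) "" = (w :: ws).getLast (by simp) := by
  rw [List.getLast_eq_getElem]
  simp [PySem.List.pyGetD, PySem.List.pyGet?, PySem.List.pyIdx?]
  rfl

lemma goA_two (rest : List String) : ∀ (acc w v : String),
    goA acc (w :: v :: rest)
      = acc ++ PySem.Str.join ", " ((w :: v :: rest).dropLast)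
            ++ " and " ++ (w :: v :: rest).getLast (by simp) := by
  induction rest with
  | nil =>
    intro acc w v
    simp [goA, sjoin_singleton, String.append_assoc]
  | cons u us ih =>
    intro acc w v
    have h := ih (acc ++ w ++ ", ") v u
    rw [show goA acc (w :: v :: u :: us) = goA (acc ++ w ++ ", ") (v :: u :: us) from rfl, h]
    rw [show (w :: v :: u :: us).dropLast = w :: v :: (u :: us).dropLast from by simp,
        sjoin_cons_cons, List.getLast_cons (by simp)]
    simp [String.append_assoc]

-- ===== VERDICT (by name: the statement is the Claim_ definition above) =====
theorem quibble_spec : Claim_equal_quibble := by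
  intro words _
  unfold Spec_quibble
  have h := quibble_loop words [] "{"
  simp only [List.nil_append, List.length_nil, Nat.cast_zero] at h
  unfold quibble
  rw [h]
  cases words with
  | nil => simp [goA, quibble_alt]
  | cons w ws =>
    cases ws with
    | nil => simp [goA, quibble_alt]
    | cons v vs =>
      rw [goA_two]
      simp [quibble_alt, PySem.List.slice_to_neg_one, pyGetD_neg_one]
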